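-- pv_equiv track=rewrite | github.com/RichealYoung/BRIEF_PyTorch | utils/Networks.py | check_param_count
-- ===== SOURCE A (Python) =====
-- def check_param_count(param_count,coords_channel,data_channel,layers,res,features_dis,**kwargs):
--     features = 1 + (layers-2)*features_dis
--     limit=coords_channel*features+features
--     for i in range(layers-2):
--         limit += (features-i*features_dis)*(features-(i+1)*features_dis) + (features-(i+1)*features_dis)
--     limit += (features-(layers-2)*features_dis)*data_channel+data_channel
--     if param_count >= limit:
--         return True
--     else:
--         return False
-- ===== SOURCE B (Python) =====
-- def check_param_count(param_count, coords_channel, data_channel, layers, res, features_dis, **kwargs):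
--     f = 1 + (layers - 2) * features_dis
--     d = features_dis
--     n = layers - 2 if layers > 2 else 0
--     s = (n * (f * f + f)
--          - f * d * n * n
--          + d * d * ((n * n * n - n) // 3)
--          - d * (n * (n + 1) // 2))
--     limit = coords_channel * f + f + s + (f - (layers - 2) * d) * data_channel + data_channel
--     return param_count >= limit
-- ===== Notes on version B (the rewrite author's own statement) =====
-- stated objective: faster
-- what changed: Replaced the O(layers) loop summing per-layer parameter counts with a closed-form polynomial (using sum-of-i and sum-of-i^2 identities), so the limit is computed in O(1).
import Mathlib
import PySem

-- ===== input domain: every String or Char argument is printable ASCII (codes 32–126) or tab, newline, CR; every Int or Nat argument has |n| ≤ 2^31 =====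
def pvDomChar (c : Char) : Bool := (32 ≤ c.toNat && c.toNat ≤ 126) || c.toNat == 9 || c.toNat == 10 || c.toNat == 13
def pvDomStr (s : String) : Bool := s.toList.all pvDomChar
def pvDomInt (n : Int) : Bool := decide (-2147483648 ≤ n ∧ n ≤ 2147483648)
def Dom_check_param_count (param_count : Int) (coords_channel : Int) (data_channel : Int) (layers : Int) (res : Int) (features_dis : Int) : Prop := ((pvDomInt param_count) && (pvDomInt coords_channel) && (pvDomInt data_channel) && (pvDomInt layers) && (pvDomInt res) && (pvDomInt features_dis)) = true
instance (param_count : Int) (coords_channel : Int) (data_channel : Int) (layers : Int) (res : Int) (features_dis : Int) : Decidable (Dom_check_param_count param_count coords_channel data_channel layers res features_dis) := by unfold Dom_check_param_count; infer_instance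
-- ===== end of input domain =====

-- B replaces A's O(layers) loop by a closed-form polynomial evaluation of the same sum (objective: faster, constant-time in layers).


-- ===== PORT A =====
def check_param_count (param_count : Int) (coords_channel : Int) (data_channel : Int) (layers : Int) (res : Int) (features_dis : Int) : Bool :=
  let features := 1 + (layers - 2) * features_dis
  let limit := coords_channel * features + features
  let limit := (PySem.List.pyRange 0 (layers - 2) 1).foldl
    (fun limit i =>
      limit + ((features - i * features_dis) * (features - (i + 1) * features_dis)
               + (features - (i + 1) * features_dis))) limit
  let limit := limit + ((features - (layers - 2) * features_dis) * data_channel + data_channel)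
  if param_count ≥ limit then true else false

-- ===== PORT B =====
def check_param_count_alt (param_count : Int) (coords_channel : Int) (data_channel : Int) (layers : Int) (res : Int) (features_dis : Int) : Bool :=
  let f := 1 + (layers - 2) * features_dis
  let d := features_dis
  let n : Int := if layers > 2 then layers - 2 else 0
  let s := n * (f * f + f) - f * d * n * n
           + d * d * PySem.Int.floordiv (n * n * n - n) 3
           - d * PySem.Int.floordiv (n * (n + 1)) 2
  let limit := coords_channel * f + f + s + (f - (layers - 2) * d) * data_channel + data_channel
  param_count ≥ limit

-- ===== PRECONDITION & SPEC =====
def Spec_check_param_count (param_count : Int) (coords_channel : Int) (data_channel : Int) (layers : Int) (res : Int) (features_dis : Int) (out : Bool) : Prop := out = check_param_count_alt param_count coords_channel data_channel layers res features_dis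
instance (param_count : Int) (coords_channel : Int) (data_channel : Int) (layers : Int) (res : Int) (features_dis : Int) (out : Bool) : Decidable (Spec_check_param_count param_count coords_channel data_channel layers res features_dis out) := by unfold Spec_check_param_count; infer_instance

-- ===== CLAIM (what is proved, stated in full; the proofs are below) =====
def Claim_equal_check_param_count : Prop := ∀ (param_count : Int) (coords_channel : Int) (data_channel : Int) (layers : Int) (res : Int) (features_dis : Int), Dom_check_param_count param_count coords_channel data_channel layers res features_dis → Spec_check_param_count param_count coords_channel data_channel layers res features_dis (check_param_count param_count coords_channel data_channel layers res features_dis)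

-- ===== LEMMAS AND PROOFS =====

-- exact integer value of sum_{i<m} (i*i + i), i.e. (m^3 - m)/3
def pvCube3 : Nat → Int
  | 0 => 0
  | m + 1 => pvCube3 m + (m : Int) * m + m

-- exact integer value of sum_{i<m} (i + 1), i.e. m(m+1)/2
def pvTri : Nat → Int
  | 0 => 0
  | m + 1 => pvTri m + m + 1

theorem pvCube3_mul (m : Nat) : 3 * pvCube3 m = (m : Int) * m * m - m := by
  induction m with
  | zero => simp [pvCube3]
  | succ k ih => simp only [pvCube3]; push_cast; ring_nf; ring_nf at ih; linarith

theorem pvTri_mul (m : Nat) : 2 * pvTri m = (m : Int) * (m + 1) := by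
  induction m with
  | zero => simp [pvTri]
  | succ k ih => simp only [pvTri]; push_cast; ring_nf; ring_nf at ih; linarith

theorem pvFloordiv_mul_cancel (k b : Int) (hb : 0 < b) : PySem.Int.floordiv (b * k) b = k := by
  rw [PySem.Int.floordiv_eq_iff_of_pos hb]
  constructor <;> nlinarith

theorem pvLoop_closed (m : Nat) (f d init : Int) :
    (PySem.List.pyRange 0 (m : Int) 1).foldl
      (fun l i => l + ((f - i * d) * (f - (i + 1) * d) + (f - (i + 1) * d))) init
    = init + ((m : Int) * (f * f + f) - f * d * m * m + d * d * pvCube3 m - d * pvTri m) := by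
  induction m with
  | zero => simp [pvCube3, pvTri]
  | succ k ih =>
    have hsplit : PySem.List.pyRange 0 ((k+1 : Nat) : Int) 1
        = PySem.List.pyRange 0 (k : Int) 1 ++ [(k : Int)] := by
      push_cast
      exact PySem.List.pyRange_one_succ_right (Int.natCast_nonneg k)
    rw [hsplit, List.foldl_append, ih]
    simp only [List.foldl_cons, List.foldl_nil, pvCube3, pvTri]
    push_cast
    ring

theorem pvBoolEq (p x y : Int) (h : x = y) : (if p ≥ x then true else false) = decide (p ≥ y) := by
  subst h; by_cases hc : p ≥ x <;> simp [hc]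

-- ===== VERDICT (by name: the statement is the Claim_ definition above) =====
theorem check_param_count_spec : Claim_equal_check_param_count := by
  intro param_count coords_channel data_channel layers res features_dis _
  unfold Spec_check_param_count check_param_count check_param_count_alt
  by_cases h : layers > 2
  · have hm : layers - 2 = ((layers - 2).toNat : Int) := by omega
    set m : Nat := (layers - 2).toNat with hmdef
    simp only [if_pos h]
    rw [hm]
    rw [pvLoop_closed m (1 + ((m : Int)) * features_dis) features_dis]
    have h3 : (m : Int) * m * m - m = 3 * pvCube3 m := (pvCube3_mul m).symm
    have h2 : (m : Int) * ((m : Int) + 1) = 2 * pvTri m := (pvTri_mul m).symm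
    rw [h3, h2, pvFloordiv_mul_cancel _ 3 (by norm_num), pvFloordiv_mul_cancel _ 2 (by norm_num)]
    exact pvBoolEq _ _ _ (by ring)
  · have hle : layers - 2 ≤ 0 := by omega
    rw [PySem.List.pyRange_one_eq_nil hle]
    simp only [List.foldl_nil, if_neg h]
    have h30 : PySem.Int.floordiv (0 * 0 * 0 - 0 : Int) 3 = 0 := by decide
    have h20 : PySem.Int.floordiv (0 * (0 + 1) : Int) 2 = 0 := by decide
    rw [h30, h20]
    exact pvBoolEq _ _ _ (by ring)
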